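-- pv_equiv track=rewrite | github.com/vladkrylov/english_text_learning | app/scripts/db_scripts.py | GetShortName
-- ===== SOURCE A (Python) =====
-- def GetShortName(tense=None):
--     if tense:
--         err = "Wrong tense passed to GetShortName function"
--         words = tense.split()
--         l = len(words)
--
--         for w in words:
--             if len(w) < 4:
--                 raise Exception(err)
--
--         if l == 1:
--             return words[0][:4]
--         elif l == 2:
--             return words[0][:2] + words[1][:2]
--         elif l == 3:
--             return words[0][:2] + words[1][:1] + words[2][:1]
--         elif l == 4:
--             return words[0][:1] + words[1][:1] + words[2][:1] + words[3][:1]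
--         else:
--             raise Exception(err)
--     else:
--         raise Exception(err)
-- ===== SOURCE B (Python) =====
-- def GetShortName(tense=None):
--     if tense:
--         err = "Wrong tense passed to GetShortName function"
--         words = tense.split()
--         for w in words:
--             if len(w) < 4:
--                 raise Exception(err)
--         if not (1 <= len(words) <= 4):
--             raise Exception(err)
--         # distribute a 4-character budget greedily: each word contributes
--         # ceil(budget / words_left) characters; this reproduces 4 / 2+2 / 2+1+1 / 1+1+1+1
--         out = []
--         budget = 4
--         for i, w in enumerate(words):
--             k = -(-budget // (len(words) - i))
--             out.append(w[:k])
--             budget -= k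
--         return ''.join(out)
--     else:
--         raise Exception(err)
-- ===== Notes on version B (the rewrite author's own statement) =====
-- stated objective: alternative
-- what changed: Replaces the four-way if/elif chain of hard-coded prefix slices by a single greedy loop distributing a 4-character budget with ceil(budget/words_left) per word, which computes the same prefix lengths arithmetically.
import Mathlib
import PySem

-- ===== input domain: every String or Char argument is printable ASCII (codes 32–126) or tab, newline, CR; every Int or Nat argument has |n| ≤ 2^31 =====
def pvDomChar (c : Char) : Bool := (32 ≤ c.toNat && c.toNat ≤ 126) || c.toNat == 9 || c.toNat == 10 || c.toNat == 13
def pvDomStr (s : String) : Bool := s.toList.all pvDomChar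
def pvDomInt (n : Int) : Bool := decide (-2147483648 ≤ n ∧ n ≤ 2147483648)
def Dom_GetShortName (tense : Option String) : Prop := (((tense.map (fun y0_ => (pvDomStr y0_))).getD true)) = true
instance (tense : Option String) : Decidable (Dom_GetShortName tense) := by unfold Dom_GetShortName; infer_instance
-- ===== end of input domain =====

-- B replaces A's hard-coded four-way if/elif of prefix slices by one greedy loop distributing a
-- 4-character budget (ceil(budget/words_left) per word) — objective: alternative; Pre_ excludes exactly the inputs where A raises.


-- ===== PORT A =====
def GetShortName (tense : Option String) : String :=
  match tense with
  | none => ""            -- Python raises (NameError) here: outside Pre_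
  | some s =>
    if s = "" then ""     -- falsy tense: Python raises (NameError), outside Pre_
    else
      let words := PySem.Str.split₀ s
      let l := words.length
      if words.any (fun w => PySem.Str.len w < 4) then ""   -- raise Exception(err), outside Pre_
      else if l = 1 then PySem.Str.slice (words.getD 0 "") none (some 4)
      else if l = 2 then PySem.Str.slice (words.getD 0 "") none (some 2)
                         ++ PySem.Str.slice (words.getD 1 "") none (some 2)
      else if l = 3 then PySem.Str.slice (words.getD 0 "") none (some 2)
                         ++ PySem.Str.slice (words.getD 1 "") none (some 1)
                         ++ PySem.Str.slice (words.getD 2 "") none (some 1)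
      else if l = 4 then PySem.Str.slice (words.getD 0 "") none (some 1)
                         ++ PySem.Str.slice (words.getD 1 "") none (some 1)
                         ++ PySem.Str.slice (words.getD 2 "") none (some 1)
                         ++ PySem.Str.slice (words.getD 3 "") none (some 1)
      else ""             -- raise Exception(err), outside Pre_

-- ===== PORT B =====
def GetShortName_alt (tense : Option String) : String :=
  match tense with
  | none => ""            -- raise (NameError), outside Pre_
  | some s =>
    if s = "" then ""     -- raise (NameError), outside Pre_
    else
      let words := PySem.Str.split₀ s
      if words.any (fun w => PySem.Str.len w < 4) then ""   -- raise Exception(err), outside Pre_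
      else if ¬ (1 ≤ words.length ∧ words.length ≤ 4) then ""  -- raise Exception(err), outside Pre_
      else
        -- for i, w in enumerate(words): k = -(-budget // (len(words)-i)); out.append(w[:k]); budget -= k
        let st := (PySem.List.enumerate words).foldl
          (fun (acc : List String × Int) (iw : Int × String) =>
            let k := -(PySem.Int.floordiv (-acc.2) ((words.length : Int) - iw.1))
            (acc.1 ++ [PySem.Str.slice iw.2 none (some k)], acc.2 - k)) ([], 4)
        PySem.Str.join "" st.1

-- ===== PRECONDITION & SPEC =====
-- Pre_ excludes exactly the inputs on which A raises: a falsy tense (None or ""), any word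
-- shorter than 4 characters, and a word count outside 1..4.
def pvPreB_GetShortName (s : String) : Bool :=
  s ≠ "" && 1 ≤ (PySem.Str.split₀ s).length && (PySem.Str.split₀ s).length ≤ 4 &&
    (PySem.Str.split₀ s).all (fun w => 4 ≤ w.toList.length)
def Pre_GetShortName (tense : Option String) : Prop :=
  (tense.elim false pvPreB_GetShortName) = true
instance (tense : Option String) : Decidable (Pre_GetShortName tense) := by
  unfold Pre_GetShortName; infer_instance
def pvWitness_GetShortName : Option String := some "past simple"

def Spec_GetShortName (tense : Option String) (out : String) : Prop := out = GetShortName_alt tense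
instance (tense : Option String) (out : String) : Decidable (Spec_GetShortName tense out) := by
  unfold Spec_GetShortName; infer_instance

-- ===== CLAIM (what is proved, stated in full; the proofs are below) =====
def Claim_equal_GetShortName : Prop := ∀ (tense : Option String), Dom_GetShortName tense → Pre_GetShortName tense → Spec_GetShortName tense (GetShortName tense)

-- ===== LEMMAS AND PROOFS =====

-- ===== VERDICT (by name: the statement is the Claim_ definition above) =====
theorem GetShortName_spec : Claim_equal_GetShortName := by
  intro tense _ hpre
  unfold Spec_GetShortName GetShortName GetShortName_alt
  match tense with
  | none => exact absurd hpre (by simp [Pre_GetShortName])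
  | some s =>
    unfold Pre_GetShortName pvPreB_GetShortName at hpre
    simp only [Option.elim, Bool.and_eq_true, List.all_eq_true, decide_eq_true_eq] at hpre
    obtain ⟨⟨⟨hne, h1⟩, h4⟩, hlen⟩ := hpre
    simp only [if_neg hne]
    set ws := PySem.Str.split₀ s with hws
    have hany : ws.any (fun w => PySem.Str.len w < 4) = false := by
      simp only [List.any_eq_false, decide_eq_true_eq]
      intro w hw
      have := hlen w hw
      simp only [PySem.Str.len, not_lt, String.length_toList] at *
      omega
    simp only [hany]
    match ws, h1, h4 with
    | [a], _, _ =>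
      simp [PySem.List.enumerate, PySem.Str.join, PySem.Chars.join, PySem.Int.floordiv]
      apply String.toList_inj.mp
      simp [List.intercalate]
    | [a, b], _, _ =>
      simp only [List.length_cons, List.length_nil]
      simp [PySem.List.enumerate, PySem.Str.join, PySem.Chars.join, PySem.Int.floordiv]
      apply String.toList_inj.mp
      simp [List.intercalate]
    | [a, b, c], _, _ =>
      simp only [List.length_cons, List.length_nil]
      simp [PySem.List.enumerate, PySem.Str.join, PySem.Chars.join, PySem.Int.floordiv]
      apply String.toList_inj.mp
      simp [List.intercalate]
    | [a, b, c, d], _, _ =>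
      simp only [List.length_cons, List.length_nil]
      simp [PySem.List.enumerate, PySem.Str.join, PySem.Chars.join, PySem.Int.floordiv]
      apply String.toList_inj.mp
      simp [List.intercalate]
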